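-- pv_equiv track=rewrite | github.com/rahulranjansah/csc-122 | src/utilities/utility.py | is_monotonically_increasing
-- ===== SOURCE A (Python) =====
-- def is_monotonically_increasing(arr: list[int]) -> bool:
--     """Confirms Monotonically increasing cumulative sum for the function
--     """
--     cum_sum = 0
--     itr_sum = 0
--
--     for val in arr:
--         itr_sum += val
--
--         if itr_sum >= cum_sum:
--             cum_sum = itr_sum
--         else:
--             return False
--
--     return True
-- ===== SOURCE B (Python) =====
-- def is_monotonically_increasing(arr: list[int]) -> bool:
--     """Monotone cumulative sum iff every increment is non-negative."""
--     return all(v >= 0 for v in arr)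
-- ===== Notes on version B (the rewrite author's own statement) =====
-- stated objective: simpler
-- what changed: B drops both running-sum accumulators: a non-decreasing prefix sum is equivalent to every element being >= 0, so B just checks all(v >= 0 for v in arr).
import Mathlib
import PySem

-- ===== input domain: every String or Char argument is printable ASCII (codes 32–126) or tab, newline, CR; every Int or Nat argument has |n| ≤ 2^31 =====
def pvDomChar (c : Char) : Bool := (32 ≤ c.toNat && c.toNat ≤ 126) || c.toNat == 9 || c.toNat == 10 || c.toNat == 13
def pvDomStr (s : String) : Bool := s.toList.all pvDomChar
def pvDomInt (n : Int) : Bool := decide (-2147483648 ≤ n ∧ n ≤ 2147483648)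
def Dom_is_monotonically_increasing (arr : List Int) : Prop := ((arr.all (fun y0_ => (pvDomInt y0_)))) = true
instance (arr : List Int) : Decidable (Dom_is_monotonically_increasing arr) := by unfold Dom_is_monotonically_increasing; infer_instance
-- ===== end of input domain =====

-- B replaces A's two running-sum accumulators with a direct all-elements-nonnegative check (simpler).

-- ===== PORT A =====
-- the for-loop with its early return, over the state (cum_sum, itr_sum)
def pvALoop : List Int → Int → Int → Bool
  | [], _, _ => true
  | v :: rest, cum_sum, itr_sum =>
      let itr_sum' := itr_sum + v
      if itr_sum' ≥ cum_sum then pvALoop rest itr_sum' itr_sum' else false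

def is_monotonically_increasing (arr : List Int) : Bool := pvALoop arr 0 0

-- ===== PORT B =====
def is_monotonically_increasing_alt (arr : List Int) : Bool := arr.all (fun v => decide (v ≥ 0))

-- ===== PRECONDITION & SPEC =====
def Spec_is_monotonically_increasing (arr : List Int) (out : Bool) : Prop := out = is_monotonically_increasing_alt arr
instance (arr : List Int) (out : Bool) : Decidable (Spec_is_monotonically_increasing arr out) := by unfold Spec_is_monotonically_increasing; infer_instance

-- ===== CLAIM (what is proved, stated in full; the proofs are below) =====
def Claim_equal_is_monotonically_increasing : Prop := ∀ (arr : List Int), Dom_is_monotonically_increasing arr → Spec_is_monotonically_increasing arr (is_monotonically_increasing arr)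

-- ===== LEMMAS AND PROOFS =====
-- invariant: whenever cum_sum = itr_sum (true initially and re-established each step),
-- the step test itr_sum + v ≥ cum_sum is exactly 0 ≤ v
theorem pvALoop_all (arr : List Int) (s : Int) :
    pvALoop arr s s = arr.all (fun v => decide (v ≥ 0)) := by
  induction arr generalizing s with
  | nil => rfl
  | cons v rest ih =>
      simp only [pvALoop, List.all_cons]
      by_cases h : s + v ≥ s
      · rw [if_pos h, ih]
        have : v ≥ 0 := by omega
        simp [this]
      · rw [if_neg h]
        have : ¬ v ≥ 0 := by omega
        simp [this]

-- ===== VERDICT (by name: the statement is the Claim_ definition above) =====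
theorem is_monotonically_increasing_spec : Claim_equal_is_monotonically_increasing := by
  intro arr _
  unfold Spec_is_monotonically_increasing is_monotonically_increasing is_monotonically_increasing_alt
  exact pvALoop_all arr 0
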